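-- pv_equiv track=rewrite | github.com/soIver/sql_to_idef1x | backend/django_project/json2drawio.py | sort_vertices_by_degree
-- ===== SOURCE A (Python) =====
-- from collections import defaultdict, deque
--
-- def sort_vertices_by_degree(adj_matrix, n):
--     degrees = [sum(row) for row in adj_matrix]
--     visited = [False] * n
--     result = []
--
--     adjacency_list = defaultdict(list)
--     for i in range(n):
--         for j in range(n):
--             if adj_matrix[i][j]:
--                 adjacency_list[i].append(j)
--
--     while len(result) < n:
--         max_degree = -1
--         current_vertex = -1
--         for i in range(n):
--             if not visited[i] and degrees[i] > max_degree:
--                 max_degree = degrees[i]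
--                 current_vertex = i
--
--         result.append(current_vertex)
--         visited[current_vertex] = True
--
--         queue = deque([current_vertex])
--         while queue:
--             vertex = queue.popleft()
--             neighbors = sorted(adjacency_list[vertex], key=lambda x: degrees[x], reverse=True)
--             for neighbor in neighbors:
--                 if not visited[neighbor]:
--                     result.append(neighbor)
--                     visited[neighbor] = True
--                     queue.append(neighbor)
--     return result
-- ===== SOURCE B (Python) =====
-- from collections import deque
--
-- def sort_vertices_by_degree(adj_matrix, n):
--     degrees = [sum(row) for row in adj_matrix]
--     neighbors = [[j for j in range(n) if adj_matrix[i][j]] for i in range(n)]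
--     order = sorted(range(n), key=lambda i: (-degrees[i], i))
--     visited = [False] * n
--     result = []
--     for seed in order:
--         if visited[seed]:
--             continue
--         visited[seed] = True
--         result.append(seed)
--         queue = deque([seed])
--         while queue:
--             vertex = queue.popleft()
--             for w in sorted(neighbors[vertex], key=lambda x: degrees[x], reverse=True):
--                 if not visited[w]:
--                     visited[w] = True
--                     result.append(w)
--                     queue.append(w)
--     return result
-- ===== Notes on version B (the rewrite author's own statement) =====
-- stated objective: alternative
-- what changed: The repeated O(n) max-degree scan per component is replaced by one upfront sort of all vertices by (-degree, index) walked with lazy skipping of visited vertices, and the defaultdict adjacency by a precomputed list of neighbor lists; the deque BFS with degree-descending neighbor sort is kept.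
-- outside the precondition, e.g. on sort_vertices_by_degree([[-1]], 1): A returns [-1], B returns [0]; on sort_vertices_by_degree([[0, -1], [0, 1]], 2): A returns [1, -1], B returns [1, 0]; on sort_vertices_by_degree([[0, 1], [-1, 0]], 2): A returns [0, 1], B returns [0, 1]
import Mathlib
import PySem

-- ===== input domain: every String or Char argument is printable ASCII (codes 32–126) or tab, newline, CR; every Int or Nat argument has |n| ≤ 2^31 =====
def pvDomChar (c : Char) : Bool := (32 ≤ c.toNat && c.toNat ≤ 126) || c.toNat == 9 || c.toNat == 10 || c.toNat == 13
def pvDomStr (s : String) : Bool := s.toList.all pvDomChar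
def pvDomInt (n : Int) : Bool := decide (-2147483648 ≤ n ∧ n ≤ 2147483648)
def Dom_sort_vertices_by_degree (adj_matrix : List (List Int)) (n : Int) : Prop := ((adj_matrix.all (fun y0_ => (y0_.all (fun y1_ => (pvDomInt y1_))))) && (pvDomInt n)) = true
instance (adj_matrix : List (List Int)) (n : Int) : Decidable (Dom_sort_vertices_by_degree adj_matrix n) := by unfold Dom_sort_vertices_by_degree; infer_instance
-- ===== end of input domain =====

-- B replaces A's repeated linear max-degree scan by one upfront sort of the vertices by
-- (-degree, index) walked with lazy skipping of visited vertices, and the defaultdict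
-- adjacency by precomputed neighbor lists (objective: alternative; return value only).

-- ===== PORT A =====
-- adjacency_list = defaultdict(list); for i in range(n): for j in range(n): if adj_matrix[i][j]: adjacency_list[i].append(j)
-- (the dict is only read through getD afterwards, so defaultdict's read-creates-empty mutation is dropped: it never affects the result)
def pvAAdj (adj_matrix : List (List Int)) (n : Int) : PySem.Dict Int (List Int) :=
  (PySem.List.pyRange 0 n 1).foldl
    (fun d i => (PySem.List.pyRange 0 n 1).foldl
      (fun d j => if PySem.List.pyGetD (PySem.List.pyGetD adj_matrix i []) j 0 ≠ 0
        then d.insert i (d.getD i [] ++ [j]) else d) d)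
    PySem.Dict.empty

-- the inner selection scan: max_degree = -1; current_vertex = -1; for i in range(n): ...
def pvASelect (degrees : List Int) (visited : List Bool) (n : Int) : Int × Int :=
  (PySem.List.pyRange 0 n 1).foldl
    (fun md i =>
      if PySem.List.pyGetD visited i false = false ∧ md.1 < PySem.List.pyGetD degrees i 0
      then (PySem.List.pyGetD degrees i 0, i) else md)
    (-1, -1)

-- inner BFS: while queue: vertex = queue.popleft(); ... (fuel n+1 bounds the pops: each
-- enqueued vertex is freshly marked visited, so at most n+1 pops ever happen)
def pvABfs (adjacency : PySem.Dict Int (List Int)) (degrees : List Int) :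
    Nat → List Int → List Bool → List Int → List Bool × List Int
  | 0, _, visited, result => (visited, result)
  | _ + 1, [], visited, result => (visited, result)
  | fuel + 1, vertex :: queue, visited, result =>
    let nbrs := PySem.List.sorted (adjacency.getD vertex [])
      (fun x => PySem.List.pyGetD degrees x 0) true
    let st := nbrs.foldl
      (fun (st : List Bool × List Int × List Int) neighbor =>
        if PySem.List.pyGetD st.1 neighbor false = false then
          (PySem.List.pySetD st.1 neighbor true, st.2.1 ++ [neighbor], st.2.2 ++ [neighbor])
        else st)
      (visited, result, queue)
    pvABfs adjacency degrees fuel st.2.2 st.1 st.2.1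

-- while len(result) < n: select, append, mark, BFS (fuel n+1 bounds the rounds: each
-- round appends at least one element to result)
def pvAOuter (adjacency : PySem.Dict Int (List Int)) (degrees : List Int) (n : Int) :
    Nat → List Bool → List Int → List Int
  | 0, _, result => result
  | fuel + 1, visited, result =>
    if (result.length : Int) < n then
      let sel := pvASelect degrees visited n
      let result2 := result ++ [sel.2]
      let visited2 := PySem.List.pySetD visited sel.2 true
      let st := pvABfs adjacency degrees (n.toNat + 1) [sel.2] visited2 result2
      pvAOuter adjacency degrees n fuel st.1 st.2
    else result

def sort_vertices_by_degree (adj_matrix : List (List Int)) (n : Int) : List Int :=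
  let degrees := adj_matrix.map (fun row => row.sum)
  let visited := List.replicate n.toNat false
  let adjacency := pvAAdj adj_matrix n
  pvAOuter adjacency degrees n (n.toNat + 1) visited []

-- ===== PORT B =====
-- neighbors = [[j for j in range(n) if adj_matrix[i][j]] for i in range(n)]
def pvBNeighbors (adj_matrix : List (List Int)) (n : Int) : List (List Int) :=
  (PySem.List.pyRange 0 n 1).map (fun i =>
    (PySem.List.pyRange 0 n 1).filter
      (fun j => decide (PySem.List.pyGetD (PySem.List.pyGetD adj_matrix i []) j 0 ≠ 0)))

-- the same deque BFS as in Source B (fuel n+1 bounds the pops, as for port A)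
def pvBBfs (neighbors : List (List Int)) (degrees : List Int) :
    Nat → List Int → List Bool → List Int → List Bool × List Int
  | 0, _, visited, result => (visited, result)
  | _ + 1, [], visited, result => (visited, result)
  | fuel + 1, vertex :: queue, visited, result =>
    let nbrs := PySem.List.sorted (PySem.List.pyGetD neighbors vertex [])
      (fun x => PySem.List.pyGetD degrees x 0) true
    let st := nbrs.foldl
      (fun (st : List Bool × List Int × List Int) neighbor =>
        if PySem.List.pyGetD st.1 neighbor false = false then
          (PySem.List.pySetD st.1 neighbor true, st.2.1 ++ [neighbor], st.2.2 ++ [neighbor])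
        else st)
      (visited, result, queue)
    pvBBfs neighbors degrees fuel st.2.2 st.1 st.2.1

-- order = sorted(range(n), key=lambda i: (-degrees[i], i)); then one pass over order
def sort_vertices_by_degree_alt (adj_matrix : List (List Int)) (n : Int) : List Int :=
  let degrees := adj_matrix.map (fun row => row.sum)
  let neighbors := pvBNeighbors adj_matrix n
  let order := PySem.List.sorted2 (PySem.List.pyRange 0 n 1)
    (fun i => -(PySem.List.pyGetD degrees i 0)) (fun i => i) false
  (order.foldl
    (fun (st : List Bool × List Int) seed =>
      if PySem.List.pyGetD st.1 seed false = true then st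
      else pvBBfs neighbors degrees (n.toNat + 1) [seed]
        (PySem.List.pySetD st.1 seed true) (st.2 ++ [seed]))
    (List.replicate n.toNat false, [])).2

-- ===== PRECONDITION & SPEC =====
-- Pre_ excludes the inputs where A raises IndexError (n exceeding the matrix height or a row
-- length among the first n rows) and, conservatively, every matrix with a negative row sum among
-- the first n rows: on those A's max_degree = -1 sentinel can select the nonexistent vertex -1
-- (marking visited[-1] by wraparound); whether it actually fires depends on reachability, so the
-- whole region is excluded (some excluded inputs still agree) — nonnegative row sums are the
-- adjacency-matrix domain the function is written for.
def Pre_sort_vertices_by_degree (adj_matrix : List (List Int)) (n : Int) : Prop :=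
  0 ≤ n ∧ n ≤ (adj_matrix.length : Int) ∧
    ∀ row ∈ adj_matrix.take n.toNat, n ≤ (row.length : Int) ∧ 0 ≤ row.sum
instance (adj_matrix : List (List Int)) (n : Int) : Decidable (Pre_sort_vertices_by_degree adj_matrix n) := by unfold Pre_sort_vertices_by_degree; infer_instance

def pvWitness_sort_vertices_by_degree : List (List Int) × Int := ([[0, 1], [1, 0]], 2)

def Spec_sort_vertices_by_degree (adj_matrix : List (List Int)) (n : Int) (out : List Int) : Prop := out = sort_vertices_by_degree_alt adj_matrix n
instance (adj_matrix : List (List Int)) (n : Int) (out : List Int) : Decidable (Spec_sort_vertices_by_degree adj_matrix n out) := by unfold Spec_sort_vertices_by_degree; infer_instance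

-- ===== CLAIM (what is proved, stated in full; the proofs are below) =====
def Claim_equal_sort_vertices_by_degree : Prop := ∀ (adj_matrix : List (List Int)) (n : Int), Dom_sort_vertices_by_degree adj_matrix n → Pre_sort_vertices_by_degree adj_matrix n → Spec_sort_vertices_by_degree adj_matrix n (sort_vertices_by_degree adj_matrix n)

-- ===== LEMMAS AND PROOFS =====

-- the strict-lex-or-equal order B's sort key induces on vertex indices
def rOrd (degrees : List Int) (a b : Int) : Prop :=
  -(PySem.List.pyGetD degrees a 0) < -(PySem.List.pyGetD degrees b 0) ∨
    (-(PySem.List.pyGetD degrees a 0) = -(PySem.List.pyGetD degrees b 0) ∧ a ≤ b)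

-- counting false entries of the visited list
lemma pv_count_set_true (v : List Bool) (k : Nat) (hk : k < v.length) (hf : v[k] = false) :
    (v.set k true).count false + 1 = v.count false := by
  have h1 := List.count_set (a := true) (b := false) (l := v) (i := k) hk
  have h2 : 0 < v.count false := by
    rw [List.count_pos_iff]; exact hf ▸ List.getElem_mem hk
  simp [hf] at h1
  omega

lemma pv_count_false_zero (v : List Bool) (h : ∀ k, (hk : k < v.length) → v[k] = true) :
    v.count false = 0 := by
  rw [List.count_eq_zero]
  intro hmem
  obtain ⟨k, hk, hkv⟩ := List.mem_iff_getElem.mp hmem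
  exact absurd (h k hk) (by simp [hkv])

lemma pv_count_false_pos (v : List Bool) (k : Nat) (hk : k < v.length) (hf : v[k] = false) :
    0 < v.count false := by
  rw [List.count_pos_iff]; exact hf ▸ List.getElem_mem hk

-- ---- characterisation of A's selection scan ----
lemma pv_scan_keep_lt (degrees : List Int) (visited : List Bool) (du : Int) :
    ∀ (L : List Int) (m c : Int), m < du →
    (∀ w ∈ L, PySem.List.pyGetD visited w false = false → PySem.List.pyGetD degrees w 0 < du) →
    ((L.foldl (fun md i =>
        if PySem.List.pyGetD visited i false = false ∧ md.1 < PySem.List.pyGetD degrees i 0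
        then (PySem.List.pyGetD degrees i 0, i) else md) (m, c))).1 < du := by
  intro L
  induction L with
  | nil => intro m c hm _; simpa using hm
  | cons w L ih =>
    intro m c hm hall
    simp only [List.foldl_cons]
    split
    · exact ih _ _ (hall w (by simp) (by simp_all)) (fun x hx hv => hall x (by simp [hx]) hv)
    · exact ih _ _ hm (fun x hx hv => hall x (by simp [hx]) hv)

lemma pv_scan_keep_fix (degrees : List Int) (visited : List Bool) :
    ∀ (L : List Int) (m c : Int),
    (∀ w ∈ L, ¬(PySem.List.pyGetD visited w false = false ∧ m < PySem.List.pyGetD degrees w 0)) →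
    (L.foldl (fun md i =>
        if PySem.List.pyGetD visited i false = false ∧ md.1 < PySem.List.pyGetD degrees i 0
        then (PySem.List.pyGetD degrees i 0, i) else md) (m, c)) = (m, c) := by
  intro L
  induction L with
  | nil => intro m c _; rfl
  | cons w L ih =>
    intro m c hall
    simp only [List.foldl_cons]
    rw [if_neg (by simpa using hall w (by simp))]
    exact ih _ _ (fun x hx => hall x (by simp [hx]))

lemma pv_scan_eq (degrees : List Int) (visited : List Bool) (n u : Int)
    (h0 : 0 ≤ u) (h1 : u < n)
    (hu : PySem.List.pyGetD visited u false = false)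
    (hd : 0 ≤ PySem.List.pyGetD degrees u 0)
    (hmin : ∀ w, 0 ≤ w → w < n → PySem.List.pyGetD visited w false = false →
      PySem.List.pyGetD degrees w 0 < PySem.List.pyGetD degrees u 0 ∨
        (PySem.List.pyGetD degrees w 0 = PySem.List.pyGetD degrees u 0 ∧ u ≤ w)) :
    pvASelect degrees visited n = (PySem.List.pyGetD degrees u 0, u) := by
  unfold pvASelect
  rw [PySem.List.pyRange_one_append 0 u n h0 (le_of_lt h1), List.foldl_append,
    PySem.List.pyRange_one_cons h1]
  have hp := pv_scan_keep_lt degrees visited (PySem.List.pyGetD degrees u 0)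
    (PySem.List.pyRange 0 u 1) (-1) (-1) (by omega)
    (by
      intro w hw hv
      have hwb := PySem.List.mem_pyRange_one.mp hw
      rcases hmin w hwb.1 (by omega) hv with h | h
      · exact h
      · omega)
  set p := (PySem.List.pyRange 0 u 1).foldl (fun md i =>
      if PySem.List.pyGetD visited i false = false ∧ md.1 < PySem.List.pyGetD degrees i 0
      then (PySem.List.pyGetD degrees i 0, i) else md) (-1, -1) with hpdef
  simp only [List.foldl_cons]
  rw [if_pos ⟨hu, hp⟩]
  apply pv_scan_keep_fix
  intro w hw
  have hwb := PySem.List.mem_pyRange_one.mp hw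
  rintro ⟨hv, hlt⟩
  rcases hmin w (by omega) hwb.2 hv with h | h <;> omega

-- ---- the order produced by B's sort is rOrd-pairwise ----
lemma pv_insertBy_pairwise (lt : Int → Int → Bool) (R : Int → Int → Prop)
    (hlt : ∀ a b, lt a b = true → R a b) (hnlt : ∀ a b, lt a b = false → R b a)
    (htr : ∀ a b c, R a b → R b c → R a c) :
    ∀ (acc : List Int) (x : Int), acc.Pairwise R → (PySem.List.insertBy lt x acc).Pairwise R := by
  intro acc
  induction acc with
  | nil => intro x _; simp [PySem.List.insertBy]
  | cons y ys ih =>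
    intro x hp
    rw [List.pairwise_cons] at hp
    obtain ⟨hy, hys⟩ := hp
    rw [PySem.List.insertBy]
    split
    · rename_i h
      refine List.pairwise_cons.mpr ⟨?_, List.pairwise_cons.mpr ⟨hy, hys⟩⟩
      intro z hz
      rcases List.mem_cons.mp hz with rfl | hz'
      · exact hlt _ _ h
      · exact htr _ _ _ (hlt _ _ h) (hy z hz')
    · rename_i h
      refine List.pairwise_cons.mpr ⟨?_, ih x hys⟩
      intro z hz
      rcases (PySem.List.mem_insertBy _ _ _ _).mp hz with rfl | hz'
      · exact hnlt _ _ (by simpa using h)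
      · exact hy z hz'

lemma pv_foldl_insertBy_pairwise (lt : Int → Int → Bool) (R : Int → Int → Prop)
    (hlt : ∀ a b, lt a b = true → R a b) (hnlt : ∀ a b, lt a b = false → R b a)
    (htr : ∀ a b c, R a b → R b c → R a c) :
    ∀ (xs acc : List Int), acc.Pairwise R →
      (xs.foldl (fun acc x => PySem.List.insertBy lt x acc) acc).Pairwise R := by
  intro xs
  induction xs with
  | nil => intro acc h; simpa using h
  | cons x xs ih =>
    intro acc h
    simp only [List.foldl_cons]
    exact ih _ (pv_insertBy_pairwise lt R hlt hnlt htr acc x h)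

lemma pv_order_pairwise (degrees : List Int) (n : Int) :
    (PySem.List.sorted2 (PySem.List.pyRange 0 n 1)
      (fun i => -(PySem.List.pyGetD degrees i 0)) (fun i => i) false).Pairwise (rOrd degrees) := by
  unfold PySem.List.sorted2
  apply pv_foldl_insertBy_pairwise _ (rOrd degrees) _ _ _ _ [] (by simp)
  · intro a b hab
    simp at hab
    unfold rOrd
    omega
  · intro a b hab
    simp at hab
    unfold rOrd
    omega
  · intro a b c h1 h2
    unfold rOrd at *
    omega

-- ---- the two adjacency representations agree ----
lemma pv_inner_getD_self (adj : List (List Int)) (i : Int) :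
    ∀ (L : List Int) (d : PySem.Dict Int (List Int)),
    ((L.foldl (fun d j => if PySem.List.pyGetD (PySem.List.pyGetD adj i []) j 0 ≠ 0
        then d.insert i (d.getD i [] ++ [j]) else d) d)).getD i []
      = d.getD i [] ++ L.filter (fun j => decide (PySem.List.pyGetD (PySem.List.pyGetD adj i []) j 0 ≠ 0)) := by
  intro L
  induction L with
  | nil => intro d; simp
  | cons j L ih =>
    intro d
    simp only [List.foldl_cons, List.filter_cons]
    by_cases h : PySem.List.pyGetD (PySem.List.pyGetD adj i []) j 0 ≠ 0
    · rw [if_pos h, ih, PySem.Dict.getD_insert_self]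
      simp [h]
    · rw [if_neg h, ih]
      simp [h]

lemma pv_inner_getD_other (adj : List (List Int)) (i i' : Int) (hne : i' ≠ i) :
    ∀ (L : List Int) (d : PySem.Dict Int (List Int)),
    ((L.foldl (fun d j => if PySem.List.pyGetD (PySem.List.pyGetD adj i []) j 0 ≠ 0
        then d.insert i (d.getD i [] ++ [j]) else d) d)).getD i' []
      = d.getD i' [] := by
  intro L
  induction L with
  | nil => intro d; rfl
  | cons j L ih =>
    intro d
    simp only [List.foldl_cons]
    by_cases h : PySem.List.pyGetD (PySem.List.pyGetD adj i []) j 0 ≠ 0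
    · rw [if_pos h, ih, PySem.Dict.getD_insert_of_ne _ _ _ hne]
    · rw [if_neg h, ih]

lemma pv_outer_getD_notmem (adj : List (List Int)) (n : Int) :
    ∀ (R : List Int) (d : PySem.Dict Int (List Int)) (i : Int), i ∉ R →
    ((R.foldl (fun d i => (PySem.List.pyRange 0 n 1).foldl
        (fun d j => if PySem.List.pyGetD (PySem.List.pyGetD adj i []) j 0 ≠ 0
          then d.insert i (d.getD i [] ++ [j]) else d) d) d)).getD i []
      = d.getD i [] := by
  intro R
  induction R with
  | nil => intro d i _; rfl
  | cons r R ih =>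
    intro d i hmem
    simp only [List.foldl_cons]
    rw [ih _ _ (fun h => hmem (List.mem_cons.mpr (Or.inr h))),
      pv_inner_getD_other adj r i (fun h => hmem (List.mem_cons.mpr (Or.inl h)))]

lemma pv_outer_getD_mem (adj : List (List Int)) (n : Int) :
    ∀ (R : List Int) (d : PySem.Dict Int (List Int)) (i : Int), i ∈ R → R.Nodup →
    ((R.foldl (fun d i => (PySem.List.pyRange 0 n 1).foldl
        (fun d j => if PySem.List.pyGetD (PySem.List.pyGetD adj i []) j 0 ≠ 0
          then d.insert i (d.getD i [] ++ [j]) else d) d) d)).getD i []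
      = d.getD i [] ++ (PySem.List.pyRange 0 n 1).filter
          (fun j => decide (PySem.List.pyGetD (PySem.List.pyGetD adj i []) j 0 ≠ 0)) := by
  intro R
  induction R with
  | nil => intro d i h; exact absurd h (List.not_mem_nil)
  | cons r R ih =>
    intro d i hmem hnd
    rw [List.nodup_cons] at hnd
    simp only [List.foldl_cons]
    rcases List.mem_cons.mp hmem with rfl | hmem'
    · rw [pv_outer_getD_notmem adj n R _ i hnd.1, pv_inner_getD_self]
    · rw [ih _ _ hmem' hnd.2, pv_inner_getD_other adj r i (fun h => hnd.1 (h ▸ hmem'))]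

lemma pv_adjA (adj : List (List Int)) (n i : Int) (h0 : 0 ≤ i) (h1 : i < n) :
    (pvAAdj adj n).getD i []
      = (PySem.List.pyRange 0 n 1).filter
          (fun j => decide (PySem.List.pyGetD (PySem.List.pyGetD adj i []) j 0 ≠ 0)) := by
  unfold pvAAdj
  rw [pv_outer_getD_mem adj n _ _ i (PySem.List.mem_pyRange_one.mpr ⟨h0, h1⟩)
    (PySem.List.nodup_pyRange_one 0 n)]
  simp [PySem.Dict.getD, PySem.Dict.empty, PySem.Dict.get?]

lemma pv_adjB (adj : List (List Int)) (n i : Int) (h0 : 0 ≤ i) (h1 : i < n) :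
    PySem.List.pyGetD (pvBNeighbors adj n) i []
      = (PySem.List.pyRange 0 n 1).filter
          (fun j => decide (PySem.List.pyGetD (PySem.List.pyGetD adj i []) j 0 ≠ 0)) := by
  unfold pvBNeighbors
  exact PySem.List.pyGetD_map_pyRange_of_nonneg _ n i [] h0 h1

-- ---- invariants of the (shared) inner BFS fold ----
lemma pv_fold_inv (n : Int) (hn : 0 ≤ n) :
    ∀ (L : List Int) (visited : List Bool) (result queue : List Int),
    visited.length = n.toNat → (∀ w ∈ L, 0 ≤ w ∧ w < n) →
    ((L.foldl (fun (st : List Bool × List Int × List Int) neighbor =>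
        if PySem.List.pyGetD st.1 neighbor false = false then
          (PySem.List.pySetD st.1 neighbor true, st.2.1 ++ [neighbor], st.2.2 ++ [neighbor])
        else st) (visited, result, queue))).1.length = n.toNat ∧
    ((L.foldl (fun (st : List Bool × List Int × List Int) neighbor =>
        if PySem.List.pyGetD st.1 neighbor false = false then
          (PySem.List.pySetD st.1 neighbor true, st.2.1 ++ [neighbor], st.2.2 ++ [neighbor])
        else st) (visited, result, queue))).2.1.length +
      ((L.foldl (fun (st : List Bool × List Int × List Int) neighbor =>
        if PySem.List.pyGetD st.1 neighbor false = false then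
          (PySem.List.pySetD st.1 neighbor true, st.2.1 ++ [neighbor], st.2.2 ++ [neighbor])
        else st) (visited, result, queue))).1.count false
      = result.length + visited.count false ∧
    (∀ i : Int, 0 ≤ i → i < n → PySem.List.pyGetD visited i false = true →
      PySem.List.pyGetD ((L.foldl (fun (st : List Bool × List Int × List Int) neighbor =>
        if PySem.List.pyGetD st.1 neighbor false = false then
          (PySem.List.pySetD st.1 neighbor true, st.2.1 ++ [neighbor], st.2.2 ++ [neighbor])
        else st) (visited, result, queue))).1 i false = true) ∧
    result.length ≤ ((L.foldl (fun (st : List Bool × List Int × List Int) neighbor =>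
        if PySem.List.pyGetD st.1 neighbor false = false then
          (PySem.List.pySetD st.1 neighbor true, st.2.1 ++ [neighbor], st.2.2 ++ [neighbor])
        else st) (visited, result, queue))).2.1.length ∧
    ((∀ v ∈ queue, 0 ≤ v ∧ v < n) →
      ∀ v ∈ ((L.foldl (fun (st : List Bool × List Int × List Int) neighbor =>
        if PySem.List.pyGetD st.1 neighbor false = false then
          (PySem.List.pySetD st.1 neighbor true, st.2.1 ++ [neighbor], st.2.2 ++ [neighbor])
        else st) (visited, result, queue))).2.2, 0 ≤ v ∧ v < n) := by
  intro L
  induction L with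
  | nil =>
    intro visited result queue hlen _
    exact ⟨hlen, rfl, fun _ _ _ h => h, le_refl _, fun h => h⟩
  | cons w L ih =>
    intro visited result queue hlen hL
    have hw := hL w (by simp)
    have hL' : ∀ x ∈ L, 0 ≤ x ∧ x < n := fun x hx => hL x (by simp [hx])
    simp only [List.foldl_cons]
    by_cases hv : PySem.List.pyGetD visited w false = false
    · rw [if_pos hv]
      have hkn : w.toNat < visited.length := by omega
      have hlenInt : (visited.length : Int) = n := by omega
      have hgetf : visited[w.toNat] = false := by
        rw [← PySem.List.pyGetD_eq_getElem visited false hw.1 (by omega)]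
        exact hv
      have hset : PySem.List.pySetD visited w true = visited.set w.toNat true :=
        PySem.List.pySetD_of_nonneg visited true hw.1
      have hlen2 : (PySem.List.pySetD visited w true).length = n.toNat := by
        rw [hset, List.length_set]; exact hlen
      obtain ⟨i1, i2, i3, i4, i5⟩ := ih (PySem.List.pySetD visited w true)
        (result ++ [w]) (queue ++ [w]) hlen2 hL'
      have hcnt : (PySem.List.pySetD visited w true).count false + 1 = visited.count false := by
        rw [hset]; exact pv_count_set_true visited w.toNat hkn hgetf
      refine ⟨i1, by simp at i2 ⊢; omega, ?_, ?_, ?_⟩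
      · intro i hi0 hin hvi
        apply i3 i hi0 hin
        have hiw : i = ((i.toNat : Nat) : Int) := by omega
        have hww : w = ((w.toNat : Nat) : Int) := by omega
        rw [hiw, hww, PySem.List.pyGetD_pySetD_natCast visited w.toNat i.toNat true false hkn]
        split
        · rfl
        · rw [← hiw]; exact hvi
      · calc result.length ≤ (result ++ [w]).length := by simp
          _ ≤ _ := i4
      · intro hq
        apply i5
        intro v hvmem
        rcases List.mem_append.mp hvmem with h | h
        · exact hq v h
        · simp at h; exact h ▸ hw
    · rw [if_neg hv]
      exact ih visited result queue hlen hL'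

-- ---- the two BFS loops agree and preserve the bookkeeping ----
lemma pv_bfs_eq (adjacency : PySem.Dict Int (List Int)) (neighbors : List (List Int))
    (degrees : List Int) (n : Int) (hn : 0 ≤ n)
    (hadj : ∀ v, 0 ≤ v → v < n → adjacency.getD v [] = PySem.List.pyGetD neighbors v [])
    (hrng : ∀ v, 0 ≤ v → v < n → ∀ w ∈ PySem.List.pyGetD neighbors v [], 0 ≤ w ∧ w < n) :
    ∀ (fuel : Nat) (queue : List Int) (visited : List Bool) (result : List Int),
    visited.length = n.toNat → (∀ v ∈ queue, 0 ≤ v ∧ v < n) →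
    pvABfs adjacency degrees fuel queue visited result
        = pvBBfs neighbors degrees fuel queue visited result ∧
    (pvABfs adjacency degrees fuel queue visited result).1.length = n.toNat ∧
    (pvABfs adjacency degrees fuel queue visited result).2.length +
        (pvABfs adjacency degrees fuel queue visited result).1.count false
      = result.length + visited.count false ∧
    (∀ i : Int, 0 ≤ i → i < n → PySem.List.pyGetD visited i false = true →
      PySem.List.pyGetD (pvABfs adjacency degrees fuel queue visited result).1 i false = true) ∧
    result.length ≤ (pvABfs adjacency degrees fuel queue visited result).2.length := by
  intro fuel
  induction fuel with
  | zero =>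
    intro queue visited result hlen _
    exact ⟨rfl, hlen, rfl, fun _ _ _ h => h, le_refl _⟩
  | succ fuel ih =>
    intro queue visited result hlen hq
    cases queue with
    | nil => exact ⟨rfl, hlen, rfl, fun _ _ _ h => h, le_refl _⟩
    | cons vertex queue =>
      have hv := hq vertex (by simp)
      have hq' : ∀ v ∈ queue, 0 ≤ v ∧ v < n := fun v hvm => hq v (by simp [hvm])
      have hlook := hadj vertex hv.1 hv.2
      have hLb : ∀ w ∈ PySem.List.sorted (PySem.List.pyGetD neighbors vertex [])
          (fun x => PySem.List.pyGetD degrees x 0) true, 0 ≤ w ∧ w < n := by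
        intro w hw
        exact hrng vertex hv.1 hv.2 w ((PySem.List.mem_sorted _ _ _ _).mp hw)
      obtain ⟨f1, f2, f3, f4, f5⟩ := pv_fold_inv n hn
        (PySem.List.sorted (PySem.List.pyGetD neighbors vertex [])
          (fun x => PySem.List.pyGetD degrees x 0) true) visited result queue hlen hLb
      simp only [pvABfs, pvBBfs, hlook]
      obtain ⟨g1, g2, g3, g4, g5⟩ := ih _ _ _ f1 (f5 hq')
      refine ⟨g1, g2, by omega, ?_, by omega⟩
      intro i hi0 hin hvi
      exact g4 i hi0 hin (f3 i hi0 hin hvi)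

-- ---- the outer loops agree ----
lemma pv_outer_eq (adjacency : PySem.Dict Int (List Int)) (neighbors : List (List Int))
    (degrees : List Int) (n : Int) (hn : 0 ≤ n)
    (hadj : ∀ v, 0 ≤ v → v < n → adjacency.getD v [] = PySem.List.pyGetD neighbors v [])
    (hrng : ∀ v, 0 ≤ v → v < n → ∀ w ∈ PySem.List.pyGetD neighbors v [], 0 ≤ w ∧ w < n)
    (hdeg : ∀ i : Int, 0 ≤ i → i < n → 0 ≤ PySem.List.pyGetD degrees i 0) :
    ∀ (rest : List Int) (fuel : Nat) (visited : List Bool) (result : List Int),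
    visited.length = n.toNat →
    result.length + visited.count false = n.toNat →
    visited.count false < fuel →
    rest.Pairwise (rOrd degrees) →
    (∀ v ∈ rest, 0 ≤ v ∧ v < n) →
    (∀ i : Int, 0 ≤ i → i < n → PySem.List.pyGetD visited i false = false → i ∈ rest) →
    pvAOuter adjacency degrees n fuel visited result
      = (rest.foldl
          (fun (st : List Bool × List Int) seed =>
            if PySem.List.pyGetD st.1 seed false = true then st
            else pvBBfs neighbors degrees (n.toNat + 1) [seed]
              (PySem.List.pySetD st.1 seed true) (st.2 ++ [seed]))
          (visited, result)).2 := by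
  intro rest
  induction rest with
  | nil =>
    intro fuel visited result hlen hres hfuel _ _ hcov
    have hall : ∀ k, (hk : k < visited.length) → visited[k] = true := by
      intro k hk
      cases hvk : visited[k] with
      | true => rfl
      | false =>
        exfalso
        have h0 : PySem.List.pyGetD visited (k : Int) false = false := by
          rw [PySem.List.pyGetD_eq_getElem visited false (by omega) (by omega)]
          simpa using hvk
        exact absurd (hcov (k : Int) (by omega) (by omega) h0) (List.not_mem_nil)
    have hc0 := pv_count_false_zero visited hall
    cases fuel with
    | zero => omega
    | succ f =>
      simp only [pvAOuter, List.foldl_nil]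
      rw [if_neg (by omega)]
  | cons r₀ rest' ih =>
    intro fuel visited result hlen hres hfuel hpair hbnd hcov
    have hb := hbnd r₀ (by simp)
    have hbnd' : ∀ v ∈ rest', 0 ≤ v ∧ v < n := fun v hv => hbnd v (by simp [hv])
    have hpair' := List.Pairwise.of_cons hpair
    rw [List.foldl_cons]
    by_cases hvis : PySem.List.pyGetD visited r₀ false = true
    · have hred : (if PySem.List.pyGetD (visited, result).1 r₀ false = true
            then ((visited, result) : List Bool × List Int)
            else pvBBfs neighbors degrees (n.toNat + 1) [r₀]
              (PySem.List.pySetD (visited, result).1 r₀ true) ((visited, result).2 ++ [r₀]))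
          = ((visited, result) : List Bool × List Int) := by simp [hvis]
      rw [hred]
      apply ih fuel visited result hlen hres hfuel hpair' hbnd'
      intro i hi0 hin hiv
      rcases List.mem_cons.mp (hcov i hi0 hin hiv) with rfl | h
      · rw [hvis] at hiv; exact absurd hiv (by simp)
      · exact h
    · rw [Bool.not_eq_true] at hvis
      have hkn : r₀.toNat < visited.length := by omega
      have hgetf : visited[r₀.toNat] = false := by
        rw [← PySem.List.pyGetD_eq_getElem visited false hb.1 (by omega)]
        exact hvis
      have hcpos := pv_count_false_pos visited r₀.toNat hkn hgetf
      have hmin : ∀ w, 0 ≤ w → w < n → PySem.List.pyGetD visited w false = false →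
          PySem.List.pyGetD degrees w 0 < PySem.List.pyGetD degrees r₀ 0 ∨
            (PySem.List.pyGetD degrees w 0 = PySem.List.pyGetD degrees r₀ 0 ∧ r₀ ≤ w) := by
        intro w h0 h1 hwv
        rcases List.mem_cons.mp (hcov w h0 h1 hwv) with rfl | hmem
        · right; exact ⟨rfl, le_refl _⟩
        · have := (List.pairwise_cons.mp hpair).1 w hmem
          unfold rOrd at this
          omega
      have hsel := pv_scan_eq degrees visited n r₀ hb.1 hb.2 hvis (hdeg r₀ hb.1 hb.2) hmin
      cases fuel with
      | zero => omega
      | succ f =>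
        simp only [pvAOuter]
        rw [if_pos (by omega), hsel,
          show ((PySem.List.pyGetD degrees r₀ 0, r₀) : Int × Int).2 = r₀ from rfl]
        have hred : (if PySem.List.pyGetD (visited, result).1 r₀ false = true
              then ((visited, result) : List Bool × List Int)
              else pvBBfs neighbors degrees (n.toNat + 1) [r₀]
                (PySem.List.pySetD (visited, result).1 r₀ true) ((visited, result).2 ++ [r₀]))
            = pvBBfs neighbors degrees (n.toNat + 1) [r₀]
              (PySem.List.pySetD visited r₀ true) (result ++ [r₀]) := by simp [hvis]
        rw [hred]
        have hset : PySem.List.pySetD visited r₀ true = visited.set r₀.toNat true :=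
          PySem.List.pySetD_of_nonneg visited true hb.1
        have hlenset : (PySem.List.pySetD visited r₀ true).length = n.toNat := by
          rw [hset, List.length_set]; exact hlen
        have hcnt : (PySem.List.pySetD visited r₀ true).count false + 1 = visited.count false := by
          rw [hset]; exact pv_count_set_true visited r₀.toNat hkn hgetf
        obtain ⟨g1, g2, g3, g4, g5⟩ := pv_bfs_eq adjacency neighbors degrees n hn hadj hrng
          (n.toNat + 1) [r₀] (PySem.List.pySetD visited r₀ true) (result ++ [r₀]) hlenset
          (by intro v hv; simp at hv; exact hv ▸ hb)
        have hpairB : pvBBfs neighbors degrees (n.toNat + 1) [r₀]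
            (PySem.List.pySetD visited r₀ true) (result ++ [r₀])
            = ((pvABfs adjacency degrees (n.toNat + 1) [r₀]
                (PySem.List.pySetD visited r₀ true) (result ++ [r₀])).1,
               (pvABfs adjacency degrees (n.toNat + 1) [r₀]
                (PySem.List.pySetD visited r₀ true) (result ++ [r₀])).2) := by
          rw [← g1]
        rw [hpairB]
        have hlapp : (result ++ [r₀]).length = result.length + 1 := by simp
        apply ih f _ _ g2 (by omega) (by omega) hpair' hbnd'
        intro i hi0 hin hif
        have hnotset : PySem.List.pyGetD (PySem.List.pySetD visited r₀ true) i false = false := by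
          cases h : PySem.List.pyGetD (PySem.List.pySetD visited r₀ true) i false with
          | false => rfl
          | true => exact absurd (g4 i hi0 hin h) (by simp [hif])
        have hiw : i = ((i.toNat : Nat) : Int) := by omega
        have hww : r₀ = ((r₀.toNat : Nat) : Int) := by omega
        rw [hiw, hww, PySem.List.pyGetD_pySetD_natCast visited r₀.toNat i.toNat true false hkn]
          at hnotset
        by_cases hieq : i.toNat = r₀.toNat
        · rw [if_pos hieq] at hnotset; exact absurd hnotset (by simp)
        · rw [if_neg hieq] at hnotset
          rw [← hiw] at hnotset
          rcases List.mem_cons.mp (hcov i hi0 hin hnotset) with rfl | h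
          · exact absurd rfl (by omega)
          · exact h

-- ===== VERDICT (by name: the statement is the Claim_ definition above) =====
set_option maxHeartbeats 1000000 in
theorem sort_vertices_by_degree_spec : Claim_equal_sort_vertices_by_degree := by
  intro adj_matrix n _hdom hpre
  obtain ⟨hn, hlen, hrows⟩ := hpre
  simp only [Spec_sort_vertices_by_degree, sort_vertices_by_degree, sort_vertices_by_degree_alt]
  have hadj : ∀ v, 0 ≤ v → v < n →
      (pvAAdj adj_matrix n).getD v []
        = PySem.List.pyGetD (pvBNeighbors adj_matrix n) v [] := by
    intro v h0 h1
    rw [pv_adjA adj_matrix n v h0 h1, pv_adjB adj_matrix n v h0 h1]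
  have hrng : ∀ v, 0 ≤ v → v < n →
      ∀ w ∈ PySem.List.pyGetD (pvBNeighbors adj_matrix n) v [], 0 ≤ w ∧ w < n := by
    intro v h0 h1 w hw
    rw [pv_adjB adj_matrix n v h0 h1] at hw
    exact PySem.List.mem_pyRange_one.mp (List.mem_of_mem_filter hw)
  have hdeg : ∀ i : Int, 0 ≤ i → i < n →
      0 ≤ PySem.List.pyGetD (adj_matrix.map (fun row => row.sum)) i 0 := by
    intro i h0 h1
    have hil : i.toNat < adj_matrix.length := by omega
    rw [PySem.List.pyGetD_eq_getElem _ 0 h0 (by simp; omega)]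
    rw [List.getElem_map]
    have hmem : adj_matrix[i.toNat] ∈ adj_matrix.take n.toNat :=
      List.mem_iff_getElem.mpr ⟨i.toNat, by simp [List.length_take]; omega,
        by rw [List.getElem_take]⟩
    exact (hrows _ hmem).2
  apply pv_outer_eq (pvAAdj adj_matrix n) (pvBNeighbors adj_matrix n)
    (adj_matrix.map (fun row => row.sum)) n hn hadj hrng hdeg
  · simp
  · simp
  · simp
  · exact pv_order_pairwise _ n
  · intro v hv
    have := ((PySem.List.sorted2_perm (PySem.List.pyRange 0 n 1) _ _ false).mem_iff).mp hv
    exact PySem.List.mem_pyRange_one.mp this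
  · intro i hi0 hin _
    rw [(PySem.List.sorted2_perm (PySem.List.pyRange 0 n 1) _ _ false).mem_iff]
    exact PySem.List.mem_pyRange_one.mpr ⟨hi0, hin⟩
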